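-- pv_equiv track=rewrite | github.com/Glaysia/peetsfea-runner | peetsfea_runner/scheduler.py | parse_squeue_state_counts
-- ===== SOURCE A (Python) =====
-- from typing import Callable, Generic, Protocol, Sequence, TypeVar
--
-- RUNNING_STATES = frozenset({"R", "CG", "RUNNING", "COMPLETING"})
--
-- PENDING_STATES = frozenset({"PD", "PENDING"})
--
-- def parse_squeue_state_counts(lines: Sequence[str]) -> tuple[int, int, dict[str, int]]:
--     state_counts: dict[str, int] = {}
--     for raw in lines:
--         state = raw.strip().upper()
--         if not state:
--             continue
--         state_counts[state] = state_counts.get(state, 0) + 1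
--     running_count = sum(count for state, count in state_counts.items() if state in RUNNING_STATES)
--     pending_count = sum(count for state, count in state_counts.items() if state in PENDING_STATES)
--     return running_count, pending_count, state_counts
-- ===== SOURCE B (Python) =====
-- from typing import Sequence
--
-- RUNNING_STATES = frozenset({"R", "CG", "RUNNING", "COMPLETING"})
--
-- PENDING_STATES = frozenset({"PD", "PENDING"})
--
-- def parse_squeue_state_counts(lines: Sequence[str]) -> tuple[int, int, dict[str, int]]:
--     state_counts: dict[str, int] = {}
--     running_count = 0
--     pending_count = 0
--     for raw in lines:
--         state = raw.strip().upper()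
--         if not state:
--             continue
--         state_counts[state] = state_counts.get(state, 0) + 1
--         if state in RUNNING_STATES:
--             running_count += 1
--         if state in PENDING_STATES:
--             pending_count += 1
--     return running_count, pending_count, state_counts
-- ===== Notes on version B (the rewrite author's own statement) =====
-- stated objective: simpler
-- what changed: B tallies running/pending incrementally inside the single counting loop, eliminating A's two post-hoc sum-comprehension passes over the dict items.
import Mathlib
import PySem

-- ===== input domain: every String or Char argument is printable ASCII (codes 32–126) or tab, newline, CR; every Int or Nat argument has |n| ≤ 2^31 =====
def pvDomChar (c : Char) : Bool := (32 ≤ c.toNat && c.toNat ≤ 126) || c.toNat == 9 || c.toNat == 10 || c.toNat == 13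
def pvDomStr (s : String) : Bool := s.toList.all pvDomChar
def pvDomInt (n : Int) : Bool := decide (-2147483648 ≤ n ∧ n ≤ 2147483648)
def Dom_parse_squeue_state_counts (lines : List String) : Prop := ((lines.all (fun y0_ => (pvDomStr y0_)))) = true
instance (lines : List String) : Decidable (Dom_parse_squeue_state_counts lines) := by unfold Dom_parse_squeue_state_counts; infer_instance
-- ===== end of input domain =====

-- B folds the running/pending tallies into the single counting loop (simpler: no
-- post-hoc passes over the dict items); return value only, neither mutates its argument.

-- ===== PORT A =====
def RUNNING_STATES : List String := ["R", "CG", "RUNNING", "COMPLETING"]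
def PENDING_STATES : List String := ["PD", "PENDING"]

def parse_squeue_state_counts (lines : List String) : Int × Int × (List (String × Int)) :=
  let state_counts : PySem.Dict String Int :=
    lines.foldl (fun d raw =>
      let state := PySem.Str.upper (PySem.Str.strip raw)
      if state = "" then d
      else d.insert state (d.getD state 0 + 1)) PySem.Dict.empty
  let running_count : Int :=
    ((state_counts.items.filter (fun p => p.1 ∈ RUNNING_STATES)).map (fun p => p.2)).sum
  let pending_count : Int :=
    ((state_counts.items.filter (fun p => p.1 ∈ PENDING_STATES)).map (fun p => p.2)).sum
  (running_count, pending_count, state_counts.items)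

-- ===== PORT B =====
def parse_squeue_state_counts_alt (lines : List String) : Int × Int × (List (String × Int)) :=
  let res : Int × Int × PySem.Dict String Int :=
    lines.foldl (fun acc raw =>
      let state := PySem.Str.upper (PySem.Str.strip raw)
      if state = "" then acc
      else
        ((if state ∈ RUNNING_STATES then acc.1 + 1 else acc.1),
         (if state ∈ PENDING_STATES then acc.2.1 + 1 else acc.2.1),
         acc.2.2.insert state (acc.2.2.getD state 0 + 1)))
      (0, 0, PySem.Dict.empty)
  (res.1, res.2.1, res.2.2.items)

-- ===== PRECONDITION & SPEC =====
def Spec_parse_squeue_state_counts (lines : List String) (out : Int × Int × (List (String × Int))) : Prop := out = parse_squeue_state_counts_alt lines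
instance (lines : List String) (out : Int × Int × (List (String × Int))) : Decidable (Spec_parse_squeue_state_counts lines out) := by unfold Spec_parse_squeue_state_counts; infer_instance

-- ===== CLAIM (what is proved, stated in full; the proofs are below) =====
def Claim_equal_parse_squeue_state_counts : Prop := ∀ (lines : List String), Dom_parse_squeue_state_counts lines → Spec_parse_squeue_state_counts lines (parse_squeue_state_counts lines)

-- ===== LEMMAS AND PROOFS =====

set_option maxHeartbeats 1000000

-- the loop bodies of the two ports, named for the proofs
def stepA : PySem.Dict String Int → String → PySem.Dict String Int := fun d raw =>
  let state := PySem.Str.upper (PySem.Str.strip raw)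
  if state = "" then d
  else d.insert state (d.getD state 0 + 1)

def stepB : (Int × Int × PySem.Dict String Int) → String → (Int × Int × PySem.Dict String Int) :=
  fun acc raw =>
    let state := PySem.Str.upper (PySem.Str.strip raw)
    if state = "" then acc
    else
      ((if state ∈ RUNNING_STATES then acc.1 + 1 else acc.1),
       (if state ∈ PENDING_STATES then acc.2.1 + 1 else acc.2.1),
       acc.2.2.insert state (acc.2.2.getD state 0 + 1))

-- the sums A computes over the dict items, as a function of the dict
def pvSum (r : List String) (d : PySem.Dict String Int) : Int :=
  ((d.items.filter (fun p => p.1 ∈ r)).map (fun p => p.2)).sum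

lemma portA_eq (lines : List String) :
    parse_squeue_state_counts lines =
      (pvSum RUNNING_STATES (lines.foldl stepA PySem.Dict.empty),
       pvSum PENDING_STATES (lines.foldl stepA PySem.Dict.empty),
       (lines.foldl stepA PySem.Dict.empty).items) := rfl

lemma portB_eq (lines : List String) :
    parse_squeue_state_counts_alt lines =
      ((lines.foldl stepB (0, 0, PySem.Dict.empty)).1,
       (lines.foldl stepB (0, 0, PySem.Dict.empty)).2.1,
       (lines.foldl stepB (0, 0, PySem.Dict.empty)).2.2.items) := rfl

-- replacing f by f+1 at the unique occurrence of s adds 1 to the sum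
lemma pvSum_map_update (l : List String) (s : String) (f : String → Int)
    (hnd : l.Nodup) (hs : s ∈ l) :
    (l.map (fun k => if k = s then f k + 1 else f k)).sum = (l.map f).sum + 1 := by
  induction l with
  | nil => cases hs
  | cons a t ih =>
    simp only [List.nodup_cons] at hnd
    by_cases hax : a = s
    · subst hax
      have hmap : t.map (fun k => if k = a then f k + 1 else f k) = t.map f :=
        List.map_congr_left (fun x hx => by
          have : x ≠ a := fun e => hnd.1 (e ▸ hx)
          simp [this])
      rw [List.map_cons, List.map_cons, List.sum_cons, List.sum_cons, if_pos rfl, hmap]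
      ring
    · have hst : s ∈ t := (List.mem_cons.mp hs).resolve_left (fun e => hax e.symm)
      rw [List.map_cons, List.map_cons, List.sum_cons, List.sum_cons, if_neg hax,
        ih hnd.2 hst]
      ring

-- inserting (getD+1) at key s bumps the filtered sum by 1 iff s ∈ r
lemma pvSum_insert (r : List String) (d : PySem.Dict String Int) (s : String)
    (hnd : d.keys.Nodup) :
    pvSum r (d.insert s (d.getD s 0 + 1)) =
      pvSum r d + (if s ∈ r then 1 else 0) := by
  have hnd' : (d.insert s (d.getD s 0 + 1)).keys.Nodup :=
    PySem.Dict.nodup_keys_insert d s _ hnd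
  unfold pvSum
  rw [PySem.Dict.items_eq_map_keys _ hnd' 0, PySem.Dict.items_eq_map_keys d hnd 0]
  simp only [List.filter_map, List.map_map]
  have hfil : ∀ (v : String → Int),
      ((fun (p : String × Int) => decide (p.1 ∈ r)) ∘ fun k => (k, v k)) =
        (fun k => decide (k ∈ r)) := fun v => funext fun k => rfl
  have hmapf : ∀ (v : String → Int),
      ((fun (p : String × Int) => p.2) ∘ fun k => (k, v k)) = v := fun v => funext fun k => rfl
  rw [hfil, hfil, hmapf, hmapf]
  have hgd : ∀ k, (d.insert s (d.getD s 0 + 1)).getD k 0 =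
      if k = s then d.getD s 0 + 1 else d.getD k 0 := fun k =>
    PySem.Dict.getD_insert d s k _ 0
  by_cases hc : d.contains s = true
  · rw [PySem.Dict.keys_insert_of_contains d (d.getD s 0 + 1) hc]
    by_cases hsr : s ∈ r
    · rw [if_pos hsr]
      have hsmem : s ∈ d.keys.filter (fun k => decide (k ∈ r)) :=
        List.mem_filter.mpr ⟨(PySem.Dict.contains_iff_mem_keys d s).mp hc, by simpa using hsr⟩
      have hfn : (d.keys.filter (fun k => decide (k ∈ r))).Nodup := hnd.filter _
      rw [← pvSum_map_update _ s (fun k => d.getD k 0) hfn hsmem]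
      apply congrArg
      apply List.map_congr_left
      intro x _
      rw [hgd x]
      by_cases hxs : x = s
      · subst hxs; rfl
      · rw [if_neg hxs, if_neg hxs]
    · rw [if_neg hsr, add_zero]
      apply congrArg
      apply List.map_congr_left
      intro x hx
      have hxr : x ∈ r := by simpa using (List.mem_filter.mp hx).2
      have hxs : x ≠ s := fun e => hsr (e ▸ hxr)
      rw [hgd x, if_neg hxs]
  · have hc' : d.contains s = false := by simpa using hc
    rw [PySem.Dict.keys_insert_of_not_contains d (d.getD s 0 + 1) hc']
    have hsk : s ∉ d.keys := fun h =>
      (by simp [(PySem.Dict.contains_iff_mem_keys d s).mpr h] at hc')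
    have hgs : (d.insert s (d.getD s 0 + 1)).getD s 0 = 1 := by
      rw [hgd s, if_pos rfl, PySem.Dict.getD_of_not_contains d 0 hc']
      norm_num
    rw [List.filter_append, List.map_append, List.sum_append]
    have h1 : (List.map (fun k => (d.insert s (d.getD s 0 + 1)).getD k 0)
        (d.keys.filter (fun k => decide (k ∈ r)))).sum =
        (List.map (fun k => d.getD k 0) (d.keys.filter (fun k => decide (k ∈ r)))).sum := by
      apply congrArg
      apply List.map_congr_left
      intro x hx
      have hxk : x ∈ d.keys := (List.mem_filter.mp hx).1
      have hxs : x ≠ s := fun e => hsk (e ▸ hxk)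
      rw [hgd x, if_neg hxs]
    rw [h1]
    by_cases hsr : s ∈ r
    · rw [if_pos hsr]
      simp only [List.filter_cons, List.filter_nil]
      rw [if_pos (by simpa using hsr)]
      simp only [List.map_cons, List.map_nil, List.sum_cons, List.sum_nil, add_zero]
      rw [hgs]
    · rw [if_neg hsr]
      simp only [List.filter_cons, List.filter_nil]
      rw [if_neg (by simpa using hsr)]
      simp

-- loop invariant: B's running fold is A's dict fold tagged with the two pvSums
lemma pv_inv (l : List String) (d : PySem.Dict String Int) (hnd : d.keys.Nodup) :
    l.foldl stepB (pvSum RUNNING_STATES d, pvSum PENDING_STATES d, d)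
    = (pvSum RUNNING_STATES (l.foldl stepA d),
       pvSum PENDING_STATES (l.foldl stepA d),
       l.foldl stepA d) := by
  induction l generalizing d with
  | nil => simp
  | cons raw t ih =>
    rw [List.foldl_cons, List.foldl_cons]
    by_cases h : PySem.Str.upper (PySem.Str.strip raw) = ""
    · have eA : stepA d raw = d := by simp only [stepA]; rw [if_pos h]
      have eB : stepB (pvSum RUNNING_STATES d, pvSum PENDING_STATES d, d) raw
          = (pvSum RUNNING_STATES d, pvSum PENDING_STATES d, d) := by
        simp only [stepB]; rw [if_pos h]
      rw [eA, eB]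
      exact ih d hnd
    · have eA : stepA d raw = d.insert (PySem.Str.upper (PySem.Str.strip raw))
          (d.getD (PySem.Str.upper (PySem.Str.strip raw)) 0 + 1) := by
        simp only [stepA]; rw [if_neg h]
      have eB : stepB (pvSum RUNNING_STATES d, pvSum PENDING_STATES d, d) raw
          = (pvSum RUNNING_STATES (stepA d raw),
             pvSum PENDING_STATES (stepA d raw), stepA d raw) := by
        simp only [stepB]
        rw [if_neg h, eA, pvSum_insert _ _ _ hnd, pvSum_insert _ _ _ hnd]
        split_ifs <;> simp
      rw [eB, eA]
      exact ih _ (PySem.Dict.nodup_keys_insert d _ _ hnd)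

-- ===== VERDICT (by name: the statement is the Claim_ definition above) =====
theorem parse_squeue_state_counts_spec : Claim_equal_parse_squeue_state_counts := by
  intro lines _
  unfold Spec_parse_squeue_state_counts
  rw [portA_eq, portB_eq]
  have h0r : pvSum RUNNING_STATES PySem.Dict.empty = 0 := rfl
  have h0p : pvSum PENDING_STATES PySem.Dict.empty = 0 := rfl
  have h := pv_inv lines PySem.Dict.empty PySem.Dict.nodup_keys_empty
  rw [h0r, h0p] at h
  rw [h]
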